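-- pv_equiv track=rewrite | github.com/Emadlgg/proyecto_disenio | yalex/yalex_parser.py | remove_code_blocks
-- ===== SOURCE A (Python) =====
-- def remove_code_blocks(text):
--     """
--     Elimina bloques { ... } de header y trailer.
--     Estos bloques están al inicio y al final del archivo,
--     NO son las acciones { return X } de las rules.
--     Los reconocemos porque están solos en su línea.
--     """
--     lines = text.splitlines()
--     result = []
--     in_block = False
--
--     for line in lines:
--         stripped = line.strip()
--
--         if stripped == "{":
--             in_block = True
--             continue
--
--         if stripped == "}" and in_block:
--             in_block = False
--             continue
--
--         if in_block:
--             continue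
--
--         result.append(line)
--
--     return "\n".join(result)
-- ===== SOURCE B (Python) =====
-- def remove_code_blocks(text):
--     lines = text.splitlines()
--     result = []
--     i = 0
--     n = len(lines)
--     while i < n:
--         if lines[i].strip() == "{":
--             i += 1
--             while i < n and lines[i].strip() != "}":
--                 i += 1
--             i += 1  # skip the closing "}" (or run off the end)
--         else:
--             result.append(lines[i])
--             i += 1
--     return "\n".join(result)
-- ===== Notes on version B (the rewrite author's own statement) =====
-- stated objective: alternative
-- what changed: Replaced the boolean in_block flag state machine over a for-loop with an index-driven scan that, on a '{' line, runs an inner while loop to skip forward past the matching '}' (or the end), so no cross-iteration flag state is kept.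
import Mathlib
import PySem

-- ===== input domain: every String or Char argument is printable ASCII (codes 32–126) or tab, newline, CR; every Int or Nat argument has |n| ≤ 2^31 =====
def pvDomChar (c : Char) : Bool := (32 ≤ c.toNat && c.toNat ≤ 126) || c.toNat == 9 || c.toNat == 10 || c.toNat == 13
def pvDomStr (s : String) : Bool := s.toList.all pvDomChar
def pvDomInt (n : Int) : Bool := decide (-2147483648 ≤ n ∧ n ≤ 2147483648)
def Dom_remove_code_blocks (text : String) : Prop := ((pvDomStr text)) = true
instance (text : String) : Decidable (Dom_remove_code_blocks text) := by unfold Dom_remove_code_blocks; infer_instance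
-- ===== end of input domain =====

-- B replaces A's in_block flag state machine by an index/scan-and-skip decomposition (objective: alternative).

-- ===== PORT A =====
-- one fold step of A's for-loop; state = (result, in_block)
def rcbStepA (s : List String × Bool) (line : String) : List String × Bool :=
  let stripped := PySem.Str.strip line
  if stripped == "{" then (s.1, true)
  else if stripped == "}" && s.2 then (s.1, false)
  else if s.2 then s
  else (s.1 ++ [line], s.2)

def remove_code_blocks (text : String) : String :=
  let lines := PySem.Str.splitlines text
  let st := lines.foldl rcbStepA ([], false)
  PySem.Str.join "\n" st.1

-- ===== PORT B =====
-- inner while loop: advance past lines until one stripping to "}" is skipped too (or the end)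
def rcbSkip : List String → List String
  | [] => []
  | l :: ls => if PySem.Str.strip l == "}" then ls else rcbSkip ls

theorem rcbSkip_length_le : ∀ (ls : List String), (rcbSkip ls).length ≤ ls.length
  | [] => le_refl _
  | l :: ls => by
      simp only [rcbSkip]
      split
      · simp
      · exact le_trans (rcbSkip_length_le ls) (Nat.le_succ _)

-- outer while loop over the line index
def rcbScan : List String → List String
  | [] => []
  | l :: ls =>
      if PySem.Str.strip l == "{" then rcbScan (rcbSkip ls)
      else l :: rcbScan ls
  termination_by ls => ls.length
  decreasing_by
  · exact Nat.lt_succ_of_le (rcbSkip_length_le ls)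
  · simp

def remove_code_blocks_alt (text : String) : String :=
  PySem.Str.join "\n" (rcbScan (PySem.Str.splitlines text))

-- ===== PRECONDITION & SPEC =====
def Spec_remove_code_blocks (text : String) (out : String) : Prop := out = remove_code_blocks_alt text
instance (text : String) (out : String) : Decidable (Spec_remove_code_blocks text out) := by unfold Spec_remove_code_blocks; infer_instance

-- ===== CLAIM (what is proved, stated in full; the proofs are below) =====
def Claim_equal_remove_code_blocks : Prop := ∀ (text : String), Dom_remove_code_blocks text → Spec_remove_code_blocks text (remove_code_blocks text)

-- ===== LEMMAS AND PROOFS =====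
-- invariant of A's fold: from in_block=false it produces rcbScan, from in_block=true it first skips (rcbSkip)
theorem rcbFold_inv : ∀ (ls : List String) (acc : List String),
    (ls.foldl rcbStepA (acc, false)).1 = acc ++ rcbScan ls ∧
    (ls.foldl rcbStepA (acc, true)).1 = acc ++ rcbScan (rcbSkip ls)
  | [], acc => by simp [rcbScan, rcbSkip]
  | l :: ls, acc => by
      have ih := rcbFold_inv ls acc
      by_cases hb : PySem.Str.strip l == "{"
      · simp only [List.foldl, rcbStepA, hb, if_pos, rcbScan, rcbSkip]
        have hne : (PySem.Str.strip l == "}") = false := by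
          cases h : PySem.Str.strip l == "}"
          · rfl
          · exact absurd (eq_of_beq hb ▸ eq_of_beq h) (by decide)
        simp [hne, ih.2]
      · by_cases hc : PySem.Str.strip l == "}"
        · simp only [List.foldl, rcbStepA, hb, hc, rcbScan, rcbSkip]
          simp [ih.1, (rcbFold_inv ls (acc ++ [l])).1]
        · simp only [List.foldl, rcbStepA, hb, hc, rcbScan, rcbSkip]
          simp [ih.2, (rcbFold_inv ls (acc ++ [l])).1]
  termination_by ls => ls.length

-- ===== VERDICT (by name: the statement is the Claim_ definition above) =====
theorem remove_code_blocks_spec : Claim_equal_remove_code_blocks := by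
  intro text _
  unfold Spec_remove_code_blocks remove_code_blocks remove_code_blocks_alt
  simp [(rcbFold_inv (PySem.Str.splitlines text) []).1]
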